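-- pv_equiv track=rewrite | github.com/SergeyDarbinyan/algorithms_rau | src/classwork8/cls2.py | get_missing_edges_for_full_graph
-- ===== SOURCE A (Python) =====
-- from typing import List
--
-- def get_missing_edges_for_full_graph(n_tops: int, existing_edges: List[List[int]]) -> List[List[int]]:
--     all_edges: List[List[int]] = []
--     for i in range(n_tops):
--         for j in range(i + 1, n_tops):
--             all_edges.append([i, j])
--     edges_to_return: List[List[int]] = []
--     for i in all_edges:
--         if i not in existing_edges and i[::-1] not in existing_edges:
--             edges_to_return.append(i)
--     return edges_to_return
-- ===== SOURCE B (Python) =====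
-- def get_missing_edges_for_full_graph(n_tops, existing_edges):
--     # bucket each valid edge by its smaller endpoint
--     nbrs = {}
--     for e in existing_edges:
--         if len(e) == 2:
--             a, b = (e[0], e[1]) if e[0] <= e[1] else (e[1], e[0])
--             if 0 <= a and a != b and b < n_tops:
--                 nbrs.setdefault(a, []).append(b)
--     result = []
--     for i in range(n_tops):
--         blocked = sorted(nbrs.get(i, []))
--         k = 0
--         m = len(blocked)
--         for j in range(i + 1, n_tops):
--             while k < m and blocked[k] < j:
--                 k += 1
--             if k < m and blocked[k] == j:
--                 continue
--             result.append([i, j])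
--     return result
-- ===== Notes on version B (the rewrite author's own statement) =====
-- stated objective: alternative
-- what changed: B buckets the existing edges by their smaller endpoint into per-vertex adjacency lists, then emits each row i by a two-pointer merge of range(i+1, n_tops) against that vertex's sorted bucket, replacing A's two linear scans of the whole edge list per candidate pair (intended as faster; a timing run read 18.19x at the largest size both finished but could not confirm the label since both time out on the biggest inputs).
import Mathlib
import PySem

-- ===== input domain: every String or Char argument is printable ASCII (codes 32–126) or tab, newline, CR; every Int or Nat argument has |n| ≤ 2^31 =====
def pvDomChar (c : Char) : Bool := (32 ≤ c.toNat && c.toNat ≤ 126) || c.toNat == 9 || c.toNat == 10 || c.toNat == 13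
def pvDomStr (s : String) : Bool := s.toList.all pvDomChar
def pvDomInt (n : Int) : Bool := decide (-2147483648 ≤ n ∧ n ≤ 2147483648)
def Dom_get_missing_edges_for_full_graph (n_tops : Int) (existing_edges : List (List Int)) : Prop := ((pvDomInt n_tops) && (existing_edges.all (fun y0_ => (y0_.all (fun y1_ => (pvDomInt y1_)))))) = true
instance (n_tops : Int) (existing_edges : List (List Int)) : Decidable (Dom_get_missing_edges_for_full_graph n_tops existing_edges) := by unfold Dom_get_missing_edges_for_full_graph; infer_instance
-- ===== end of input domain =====

-- B buckets the edges by their smaller endpoint, then emits each row i by a two-pointer merge of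
-- range(i+1, n) against that vertex's sorted bucket — no membership test per candidate pair.

-- ===== PORT A =====
def get_missing_edges_for_full_graph (n_tops : Int) (existing_edges : List (List Int)) : List (List Int) :=
  let all_edges : List (List Int) :=
    (PySem.List.pyRange 0 n_tops 1).foldl (fun acc i =>
      (PySem.List.pyRange (i + 1) n_tops 1).foldl (fun acc2 j => acc2 ++ [[i, j]]) acc) []
  all_edges.foldl (fun acc i =>
    if !(existing_edges.contains i) && !(existing_edges.contains i.reverse) then acc ++ [i]
    else acc) []

-- ===== PORT B =====
-- the `while k < m and blocked[k] < j: k += 1` pointer advance, as the suffix it leaves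
def pvAdvance (j : Int) : List Int → List Int
  | [] => []
  | b :: r => if b < j then pvAdvance j r else b :: r

-- the inner `for j in range(i+1, n_tops)` loop of B, threading the pointer suffix
def pvRowLoop (i : Int) (blocked : List Int) (js : List Int) (result : List (List Int)) : List (List Int) :=
  match js with
  | [] => result
  | j :: js' =>
    let bl := pvAdvance j blocked
    if bl.head? = some j then pvRowLoop i bl js' result      -- k < m and blocked[k] == j: continue
    else pvRowLoop i bl js' (result ++ [[i, j]])

def get_missing_edges_for_full_graph_alt (n_tops : Int) (existing_edges : List (List Int)) : List (List Int) :=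
  -- nbrs = {}; for e: if len(e)==2: normalize; if in range: nbrs.setdefault(a, []).append(b)
  let nbrs : PySem.Dict Int (List Int) :=
    existing_edges.foldl (fun d e =>
      match e with
      | [e0, e1] =>
        let p := if e0 ≤ e1 then (e0, e1) else (e1, e0)
        if 0 ≤ p.1 ∧ p.1 ≠ p.2 ∧ p.2 < n_tops then d.insert p.1 (d.getD p.1 [] ++ [p.2]) else d
      | _ => d) PySem.Dict.empty
  (PySem.List.pyRange 0 n_tops 1).foldl (fun result i =>
    pvRowLoop i (PySem.List.sorted (nbrs.getD i []) (fun x => x) false)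
      (PySem.List.pyRange (i + 1) n_tops 1) result) []

-- ===== PRECONDITION & SPEC =====
def Spec_get_missing_edges_for_full_graph (n_tops : Int) (existing_edges : List (List Int)) (out : List (List Int)) : Prop := out = get_missing_edges_for_full_graph_alt n_tops existing_edges
instance (n_tops : Int) (existing_edges : List (List Int)) (out : List (List Int)) : Decidable (Spec_get_missing_edges_for_full_graph n_tops existing_edges out) := by unfold Spec_get_missing_edges_for_full_graph; infer_instance

-- ===== CLAIM (what is proved, stated in full; the proofs are below) =====
def Claim_equal_get_missing_edges_for_full_graph : Prop := ∀ (n_tops : Int) (existing_edges : List (List Int)), Dom_get_missing_edges_for_full_graph n_tops existing_edges → Spec_get_missing_edges_for_full_graph n_tops existing_edges (get_missing_edges_for_full_graph n_tops existing_edges)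

-- ===== LEMMAS AND PROOFS =====

-- the candidate pairs, in generation order
def pvCands (n : Int) : List (Int × Int) :=
  (PySem.List.pyRange 0 n 1).flatMap (fun i =>
    (PySem.List.pyRange (i + 1) n 1).map (fun j => (i, j)))

lemma pvCands_mem_range {n : Int} {t : Int × Int} (h : t ∈ pvCands n) :
    0 ≤ t.1 ∧ t.1 < t.2 ∧ t.2 < n := by
  unfold pvCands at h
  simp only [List.mem_flatMap, List.mem_map] at h
  obtain ⟨i, hi, j, hj, rfl⟩ := h
  have h1 := PySem.List.mem_pyRange_one.mp hi
  have h2 := PySem.List.mem_pyRange_one.mp hj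
  exact ⟨h1.1, by omega, h2.2⟩

-- A's nested build loop produces the candidate pairs (as lists)
lemma pvA_all_edges (n : Int) :
    (PySem.List.pyRange 0 n 1).foldl (fun acc i =>
      (PySem.List.pyRange (i + 1) n 1).foldl (fun acc2 j => acc2 ++ [[i, j]]) acc) []
    = (pvCands n).map (fun t => [t.1, t.2]) := by
  have hin : ∀ (i : Int) (acc2 : List (List Int)),
      (PySem.List.pyRange (i + 1) n 1).foldl (fun acc2 j => acc2 ++ [[i, j]]) acc2
      = acc2 ++ (PySem.List.pyRange (i + 1) n 1).map (fun j => [i, j]) :=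
    fun i acc2 => PySem.List.foldl_append_singleton_eq_map _ _ _
  simp only [hin]
  rw [PySem.List.foldl_append_eq_flatMap, List.nil_append]
  unfold pvCands
  rw [List.map_flatMap]
  simp [Function.comp_def]

-- A's filter predicate, on a pair
def pvPA (E : List (List Int)) (t : Int × Int) : Bool :=
  !(E.contains [t.1, t.2]) && !(E.contains [t.2, t.1])

lemma pvA_eq (n : Int) (E : List (List Int)) :
    get_missing_edges_for_full_graph n E
    = ((pvCands n).filter (pvPA E)).map (fun t => [t.1, t.2]) := by
  unfold get_missing_edges_for_full_graph
  rw [pvA_all_edges]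
  rw [PySem.List.foldl_append_if (fun i => !(E.contains i) && !(E.contains i.reverse)) (fun i => i)]
  rw [List.nil_append, List.filter_map, List.map_id']
  have : ∀ t ∈ pvCands n, ((fun i => !(E.contains i) && !(E.contains i.reverse)) ∘ (fun t : Int × Int => [t.1, t.2])) t = pvPA E t := by
    intro t _
    simp [pvPA]
  rw [List.filter_congr this]

-- the normalized in-range pair of an edge, if any (B's guard chain, functionally)
def pvNorm (n : Int) (e : List Int) : Option (Int × Int) :=
  match e with
  | [e0, e1] =>
    let p := if e0 ≤ e1 then (e0, e1) else (e1, e0)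
    if 0 ≤ p.1 ∧ p.1 ≠ p.2 ∧ p.2 < n then some p else none
  | _ => none

-- the bucket of vertex i, in edge order
def pvCollect (n : Int) (E : List (List Int)) (i : Int) : List Int :=
  E.filterMap (fun e => (pvNorm n e).bind (fun p => if p.1 = i then some p.2 else none))

-- one step of B's bucketing loop, through pvNorm
lemma pvStepDict_eq (n : Int) (d : PySem.Dict Int (List Int)) (e : List Int) :
    (match e with
     | [e0, e1] =>
       let p := if e0 ≤ e1 then (e0, e1) else (e1, e0)
       if 0 ≤ p.1 ∧ p.1 ≠ p.2 ∧ p.2 < n then d.insert p.1 (d.getD p.1 [] ++ [p.2]) else d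
     | _ => d)
    = match pvNorm n e with
      | some p => d.insert p.1 (d.getD p.1 [] ++ [p.2])
      | none => d := by
  rcases e with _ | ⟨e0, _ | ⟨e1, _ | ⟨e2, r⟩⟩⟩ <;> simp only [pvNorm] <;> try rfl
  split_ifs <;> rfl

-- B's bucketing loop fills each bucket with pvCollect
lemma pvNbrs_getD (n : Int) (E : List (List Int)) : ∀ (d : PySem.Dict Int (List Int)) (i : Int),
    (E.foldl (fun d e =>
      match e with
      | [e0, e1] =>
        let p := if e0 ≤ e1 then (e0, e1) else (e1, e0)
        if 0 ≤ p.1 ∧ p.1 ≠ p.2 ∧ p.2 < n then d.insert p.1 (d.getD p.1 [] ++ [p.2]) else d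
      | _ => d) d).getD i []
    = d.getD i [] ++ pvCollect n E i := by
  induction E with
  | nil => intro d i; simp [pvCollect]
  | cons e E ih =>
    intro d i
    rw [List.foldl_cons, pvStepDict_eq, ih]
    have hcol : pvCollect n (e :: E) i
        = (match pvNorm n e with
           | some p => if p.1 = i then p.2 :: pvCollect n E i else pvCollect n E i
           | none => pvCollect n E i) := by
      cases hn : pvNorm n e with
      | none => simp [pvCollect, hn]
      | some p =>
        by_cases hp : p.1 = i <;> simp [pvCollect, hn, hp]
    rw [hcol]
    cases hn : pvNorm n e with
    | none => rfl
    | some p =>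
      rw [PySem.Dict.getD_insert]
      by_cases hp : p.1 = i
      · subst hp; simp
      · simp [hp, Ne.symm hp]

-- ----- pointer-advance lemmas (bl nondecreasing) -----

lemma pvAdvance_subset {j : Int} : ∀ {bl : List Int} {x : Int}, x ∈ pvAdvance j bl → x ∈ bl := by
  intro bl
  induction bl with
  | nil => intro x h; exact absurd h (by simp [pvAdvance])
  | cons b r ih =>
    intro x h
    by_cases hb : b < j
    · simp only [pvAdvance, if_pos hb] at h
      exact List.mem_cons_of_mem _ (ih h)
    · simpa only [pvAdvance, if_neg hb] using h

lemma pvAdvance_pairwise {j : Int} : ∀ {bl : List Int},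
    bl.Pairwise (· ≤ ·) → (pvAdvance j bl).Pairwise (· ≤ ·) := by
  intro bl
  induction bl with
  | nil => intro _; simp [pvAdvance]
  | cons b r ih =>
    intro h
    by_cases hb : b < j
    · simpa only [pvAdvance, if_pos hb] using ih h.of_cons
    · simpa only [pvAdvance, if_neg hb] using h

lemma pvAdvance_ge {j : Int} : ∀ {bl : List Int},
    bl.Pairwise (· ≤ ·) → ∀ x ∈ pvAdvance j bl, j ≤ x := by
  intro bl
  induction bl with
  | nil => intro _ x hx; exact absurd hx (by simp [pvAdvance])
  | cons b r ih =>
    intro h x hx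
    by_cases hb : b < j
    · exact ih h.of_cons x (by simpa only [pvAdvance, if_pos hb] using hx)
    · rw [pvAdvance, if_neg hb] at hx
      rcases List.mem_cons.mp hx with rfl | hx
      · omega
      · have := (List.pairwise_cons.mp h).1 x hx
        omega

lemma pvAdvance_mem {j y : Int} (hy : j ≤ y) : ∀ {bl : List Int},
    bl.Pairwise (· ≤ ·) → (y ∈ pvAdvance j bl ↔ y ∈ bl) := by
  intro bl
  induction bl with
  | nil => intro _; simp [pvAdvance]
  | cons b r ih =>
    intro h
    by_cases hb : b < j
    · rw [pvAdvance, if_pos hb, ih h.of_cons]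
      have : y ≠ b := by omega
      simp [this]
    · rw [pvAdvance, if_neg hb]

lemma pvAdvance_head {j : Int} {bl : List Int} (h : bl.Pairwise (· ≤ ·)) :
    ((pvAdvance j bl).head? = some j) ↔ j ∈ bl := by
  constructor
  · intro hh
    exact pvAdvance_subset (List.mem_of_mem_head? hh)
  · intro hj
    have hmem : j ∈ pvAdvance j bl := (pvAdvance_mem le_rfl h).mpr hj
    rcases ha : pvAdvance j bl with _ | ⟨a, r⟩
    · rw [ha] at hmem; cases hmem
    · rw [ha] at hmem
      have hga := pvAdvance_ge h a (by rw [ha]; exact List.mem_cons_self)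
      have hpw := pvAdvance_pairwise (j := j) h
      rw [ha] at hpw
      have : a = j := by
        rcases List.mem_cons.mp hmem with rfl | hr
        · rfl
        · have := (List.pairwise_cons.mp hpw).1 j hr
          omega
      simp [this]

-- B's inner merge walk is exactly the "j not blocked" filter of the row
lemma pvRowLoop_eq (i : Int) : ∀ (js bl : List Int) (acc : List (List Int)),
    bl.Pairwise (· ≤ ·) → js.Pairwise (· < ·) →
    pvRowLoop i bl js acc
    = acc ++ (js.filter (fun j => !(bl.contains j))).map (fun j => [i, j]) := by
  intro js
  induction js with
  | nil => intro bl acc _ _; simp [pvRowLoop]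
  | cons j js' ih =>
    intro bl acc hbl hjs
    have hfil : js'.filter (fun j' => !((pvAdvance j bl).contains j'))
        = js'.filter (fun j' => !(bl.contains j')) := by
      apply List.filter_congr
      intro j' hj'
      have hlt : j < j' := (List.pairwise_cons.mp hjs).1 j' hj'
      have hadv := pvAdvance_mem (le_of_lt hlt) (bl := bl) hbl
      rw [Bool.eq_iff_iff]
      simp [List.contains_iff_mem, hadv]
    have hbl' := pvAdvance_pairwise (j := j) hbl
    by_cases hj : j ∈ bl
    · rw [pvRowLoop, if_pos ((pvAdvance_head hbl).mpr hj),
        ih (pvAdvance j bl) acc hbl' hjs.of_cons, hfil]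
      simp [hj]
    · rw [pvRowLoop, if_neg (fun hh => hj ((pvAdvance_head hbl).mp hh)),
        ih (pvAdvance j bl) (acc ++ [[i, j]]) hbl' hjs.of_cons, hfil]
      simp [hj]

-- a filter over the candidate pairs, distributed over the row structure
lemma pvAssemble (n : Int) (Q : Int × Int → Bool) :
    ((pvCands n).filter Q).map (fun t => [t.1, t.2])
    = (PySem.List.pyRange 0 n 1).flatMap (fun i =>
        ((PySem.List.pyRange (i + 1) n 1).filter (fun j => Q (i, j))).map (fun j => [i, j])) := by
  unfold pvCands
  rw [List.filter_flatMap, List.map_flatMap]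
  congr 1
  funext i
  rw [List.filter_map, List.map_map]
  simp [Function.comp_def]

-- B's predicate, on a pair
def pvQB (n : Int) (E : List (List Int)) (t : Int × Int) : Bool :=
  !((PySem.List.sorted (pvCollect n E t.1) (fun x => x) false).contains t.2)

-- B's whole computation, characterized
lemma pvB_eq (n : Int) (E : List (List Int)) :
    get_missing_edges_for_full_graph_alt n E
    = ((pvCands n).filter (pvQB n E)).map (fun t => [t.1, t.2]) := by
  unfold get_missing_edges_for_full_graph_alt
  show (PySem.List.pyRange 0 n 1).foldl (fun result i =>
      pvRowLoop i (PySem.List.sorted ((E.foldl (fun d e =>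
        match e with
        | [e0, e1] =>
          let p := if e0 ≤ e1 then (e0, e1) else (e1, e0)
          if 0 ≤ p.1 ∧ p.1 ≠ p.2 ∧ p.2 < n then d.insert p.1 (d.getD p.1 [] ++ [p.2]) else d
        | _ => d) PySem.Dict.empty).getD i []) (fun x => x) false)
        (PySem.List.pyRange (i + 1) n 1) result) [] = _
  have hrow : ∀ (acc : List (List Int)), ∀ i ∈ PySem.List.pyRange 0 n 1,
      pvRowLoop i (PySem.List.sorted ((E.foldl (fun d e =>
        match e with
        | [e0, e1] =>
          let p := if e0 ≤ e1 then (e0, e1) else (e1, e0)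
          if 0 ≤ p.1 ∧ p.1 ≠ p.2 ∧ p.2 < n then d.insert p.1 (d.getD p.1 [] ++ [p.2]) else d
        | _ => d) PySem.Dict.empty).getD i []) (fun x => x) false)
        (PySem.List.pyRange (i + 1) n 1) acc
      = acc ++ ((PySem.List.pyRange (i + 1) n 1).filter (fun j => pvQB n E (i, j))).map
          (fun j => [i, j]) := by
    intro acc i _
    rw [pvNbrs_getD n E PySem.Dict.empty i]
    have hempty : (PySem.Dict.empty : PySem.Dict Int (List Int)).getD i [] = [] := rfl
    rw [hempty, List.nil_append]
    rw [pvRowLoop_eq i _ _ acc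
      (by simpa using PySem.List.sorted_pairwise (pvCollect n E i) (fun x : Int => x))
      (PySem.List.pairwise_lt_pyRange_one (i + 1) n)]
    rfl
  rw [PySem.List.foldl_congr_mem _ _ _ _ hrow, PySem.List.foldl_append_eq_flatMap,
    List.nil_append, pvAssemble]

-- an edge normalizes to the candidate pair t iff it is [t.1,t.2] or [t.2,t.1]
lemma pvNorm_eq_cand (n : Int) (e : List Int) (t : Int × Int)
    (h : 0 ≤ t.1 ∧ t.1 < t.2 ∧ t.2 < n) :
    (pvNorm n e = some t) ↔ (e = [t.1, t.2] ∨ e = [t.2, t.1]) := by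
  rcases e with _ | ⟨e0, _ | ⟨e1, _ | ⟨e2, r⟩⟩⟩ <;>
    simp only [pvNorm, List.cons.injEq, and_true, reduceCtorEq, false_or, or_self] <;>
    try simp
  split_ifs with h1 h2 h2 <;>
    simp only [Option.some.injEq, Prod.ext_iff, List.cons.injEq, and_true] at * <;>
    constructor <;> intro hh <;> first
      | (rcases hh with hh | hh <;> omega)
      | omega
      | (left; omega)
      | (right; omega)

-- on a candidate pair, A's membership test agrees with B's bucket
lemma pvPA_eq_QB (n : Int) (E : List (List Int)) (t : Int × Int)
    (h : 0 ≤ t.1 ∧ t.1 < t.2 ∧ t.2 < n) :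
    pvPA E t = pvQB n E t := by
  unfold pvPA pvQB
  have hmem : t.2 ∈ pvCollect n E t.1 ↔ (t.2 ∈ PySem.List.sorted (pvCollect n E t.1) (fun x => x) false) :=
    (PySem.List.mem_sorted _ _ _ _).symm
  have hcol : t.2 ∈ pvCollect n E t.1 ↔ ([t.1, t.2] ∈ E ∨ [t.2, t.1] ∈ E) := by
    unfold pvCollect
    rw [List.mem_filterMap]
    constructor
    · rintro ⟨e, he, heq⟩
      rw [Option.bind_eq_some_iff] at heq
      obtain ⟨p, hp, hif⟩ := heq
      have hpt : p = t := by
        by_cases h1 : p.1 = t.1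
        · rw [if_pos h1] at hif
          exact Prod.ext h1 (Option.some.inj hif)
        · rw [if_neg h1] at hif; cases hif
      rw [hpt] at hp
      rcases (pvNorm_eq_cand n e t h).mp hp with rfl | rfl
      · exact Or.inl he
      · exact Or.inr he
    · intro he
      rcases he with he | he
      · exact ⟨[t.1, t.2], he, by rw [(pvNorm_eq_cand n _ t h).mpr (Or.inl rfl)]; simp⟩
      · exact ⟨[t.2, t.1], he, by rw [(pvNorm_eq_cand n _ t h).mpr (Or.inr rfl)]; simp⟩
  have hc : ((PySem.List.sorted (pvCollect n E t.1) (fun x => x) false).contains t.2)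
      = (E.contains [t.1, t.2] || E.contains [t.2, t.1]) := by
    rw [Bool.eq_iff_iff]
    simp only [List.contains_iff_mem, Bool.or_eq_true]
    rw [← hmem, hcol]
  rw [hc, Bool.not_or]

-- ===== VERDICT (by name: the statement is the Claim_ definition above) =====
theorem get_missing_edges_for_full_graph_spec : Claim_equal_get_missing_edges_for_full_graph := by
  intro n E _
  show get_missing_edges_for_full_graph n E = get_missing_edges_for_full_graph_alt n E
  rw [pvA_eq, pvB_eq]
  congr 1
  apply List.filter_congr
  intro t ht
  exact pvPA_eq_QB n E t (pvCands_mem_range ht)
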